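-- pv_equiv track=rewrite | github.com/Raizus/rosalind-bioinformatics | BioInfoToolkit/Sequences/BarrowsWheeler.py | buildCheckpointCountArraysBWT
-- ===== SOURCE A (Python) =====
-- def buildCheckpointCountArraysBWT(bwt: str, c: int):
--     l = len(bwt)
--
--     checkpoint_array: list[dict[str, int]] = []
--     counts: dict[str, int] = dict()
--     checkpoint_array.append(dict())
--
--     for i, char in enumerate(bwt, 1):
--         counts.setdefault(char, 0)
--         counts[char] += 1
--         if i % c == 0:
--             checkpoint_array.append(counts)
--             counts = counts.copy()
--     return checkpoint_array
-- ===== SOURCE B (Python) =====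
-- def buildCheckpointCountArraysBWT(bwt: str, c: int):
--     checkpoints = [{}]
--     for i in range(1, len(bwt) + 1):
--         if i % c == 0:
--             prefix = bwt[:i]
--             checkpoints.append({ch: prefix.count(ch) for ch in prefix})
--     return checkpoints
-- ===== Notes on version B (the rewrite author's own statement) =====
-- stated objective: alternative
-- what changed: A maintains one running count dict, mutating it on every character and copying it at each c-th position; B keeps no running state and instead recomputes each checkpoint from scratch as a counting dict comprehension over the prefix bwt[:i]; Pre_ excludes c = 0 with nonempty bwt, where both programs raise ZeroDivisionError at 'i % c'.
import Mathlib
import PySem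

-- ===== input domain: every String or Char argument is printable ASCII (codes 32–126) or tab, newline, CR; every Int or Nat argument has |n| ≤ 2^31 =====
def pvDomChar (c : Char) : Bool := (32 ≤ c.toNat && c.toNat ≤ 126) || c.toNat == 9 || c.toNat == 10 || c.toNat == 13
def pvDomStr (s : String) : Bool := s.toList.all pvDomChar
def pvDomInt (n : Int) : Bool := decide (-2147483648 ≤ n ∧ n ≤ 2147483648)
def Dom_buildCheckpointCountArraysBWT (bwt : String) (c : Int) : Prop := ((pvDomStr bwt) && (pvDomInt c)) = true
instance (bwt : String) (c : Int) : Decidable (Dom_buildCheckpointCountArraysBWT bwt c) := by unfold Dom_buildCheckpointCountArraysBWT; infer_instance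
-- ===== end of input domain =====

-- B replaces A's single incremental counting pass (mutating one dict and copying it at
-- every c-th character) by recomputing each checkpoint independently from its pref
-- with a counting dict comprehension; objective: alternative (same values, no copies).

-- ===== PORT A =====
-- the loop body of A, named so the proofs can speak about the fold
def pvStepA (c : Int) (st : PySem.Dict String Int × List (List (String × Int)))
    (p : Int × Char) : PySem.Dict String Int × List (List (String × Int)) :=
  -- counts.setdefault(char, 0); counts[char] += 1
  let counts := PySem.Dict.insert st.1 (String.singleton p.2)
                  (PySem.Dict.getD st.1 (String.singleton p.2) 0 + 1)
  -- if i % c == 0: checkpoint_array.append(counts); counts = counts.copy()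
  if PySem.Int.mod p.1 c = 0 then (counts, st.2 ++ [counts.items]) else (counts, st.2)

def buildCheckpointCountArraysBWT (bwt : String) (c : Int) : List (List (String × Int)) :=
  let _l : Int := PySem.Str.len bwt               -- l = len(bwt) (unused by A)
  -- checkpoint_array = [dict()]; counts = dict(); for i, char in enumerate(bwt, 1): …
  let res := (PySem.List.enumerate bwt.toList 1).foldl (pvStepA c)
    (PySem.Dict.empty, [([] : List (String × Int))])
  res.2

-- ===== PORT B =====
def buildCheckpointCountArraysBWT_alt (bwt : String) (c : Int) : List (List (String × Int)) :=
  -- checkpoints = [{}]; for i in range(1, len(bwt)+1): if i % c == 0: pref = bwt[:i];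
  --   checkpoints.append({ch: pref.count(ch) for ch in pref})
  (PySem.List.pyRange 1 (PySem.Str.len bwt + 1) 1).foldl (fun out i =>
    if PySem.Int.mod i c = 0 then
      let pref := (PySem.Str.slice bwt none (some i)).toList
      out ++ [(pref.foldl (fun d ch =>
        PySem.Dict.insert d (String.singleton ch) ((pref.count ch : Int)))
        PySem.Dict.empty).items]
    else out) [([] : List (String × Int))]

-- ===== PRECONDITION & SPEC =====
-- Pre_ excludes exactly the inputs where A raises: for c = 0 and nonempty bwt, 'i % c'
-- raises ZeroDivisionError (on empty bwt the loop never runs and A returns [{}]).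
def Pre_buildCheckpointCountArraysBWT (bwt : String) (c : Int) : Prop := c ≠ 0 ∨ bwt = ""
instance (bwt : String) (c : Int) : Decidable (Pre_buildCheckpointCountArraysBWT bwt c) := by
  unfold Pre_buildCheckpointCountArraysBWT; infer_instance

def pvWitness_buildCheckpointCountArraysBWT : String × Int := ("banana", 2)

def Spec_buildCheckpointCountArraysBWT (bwt : String) (c : Int) (out : List (List (String × Int))) : Prop := out = buildCheckpointCountArraysBWT_alt bwt c
instance (bwt : String) (c : Int) (out : List (List (String × Int))) : Decidable (Spec_buildCheckpointCountArraysBWT bwt c out) := by unfold Spec_buildCheckpointCountArraysBWT; infer_instance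

-- ===== CLAIM (what is proved, stated in full; the proofs are below) =====
def Claim_equal_buildCheckpointCountArraysBWT : Prop := ∀ (bwt : String) (c : Int), Dom_buildCheckpointCountArraysBWT bwt c → Pre_buildCheckpointCountArraysBWT bwt c → Spec_buildCheckpointCountArraysBWT bwt c (buildCheckpointCountArraysBWT bwt c)

-- ===== LEMMAS AND PROOFS =====

-- the canonical value of a counting dict over xs: first occurrences, in order,
-- each with its total count in xs
def pvRow (xs : List Char) : List (String × Int) :=
  (PySem.Set.ofList xs).map (fun a => (String.singleton a, (xs.count a : Int)))

-- A's running counts dict as a function of the consumed pref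
def pvCnt (xs : List Char) : PySem.Dict String Int :=
  xs.foldl (fun d ch => PySem.Dict.insert d (String.singleton ch)
    (PySem.Dict.getD d (String.singleton ch) 0 + 1)) PySem.Dict.empty

theorem pvSing_inj {a b : Char} (h : String.singleton a = String.singleton b) : a = b := by
  simpa [String.singleton] using h

theorem pvGetD_mapped (ks : List Char) (f : Char → Int) (ch : Char) :
    PySem.Dict.getD ⟨ks.map (fun a => (String.singleton a, f a))⟩ (String.singleton ch) 0
      = if ch ∈ ks then f ch else 0 := by
  induction ks with
  | nil => simp [PySem.Dict.getD, PySem.Dict.get?]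
  | cons a ks ih =>
    by_cases hac : a = ch
    · subst hac; simp [PySem.Dict.getD, PySem.Dict.get?]
    · have hbe : (String.singleton a == String.singleton ch) = false := by
        simp only [beq_eq_false_iff_ne, ne_eq]
        exact fun h => hac (pvSing_inj h)
      have hca : ¬ ch = a := fun h => hac h.symm
      simp only [List.map_cons, PySem.Dict.getD, PySem.Dict.get?, List.find?_cons, hbe] at *
      simpa [List.mem_cons, hca] using ih

theorem pvContains_mapped (ks : List Char) (f : Char → Int) (ch : Char) :
    PySem.Dict.contains ⟨ks.map (fun a => (String.singleton a, f a))⟩ (String.singleton ch)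
      = decide (ch ∈ ks) := by
  induction ks with
  | nil => simp [PySem.Dict.contains]
  | cons a ks ih =>
    by_cases hac : a = ch
    · subst hac; simp [PySem.Dict.contains]
    · have hbe : (String.singleton a == String.singleton ch) = false := by
        simp only [beq_eq_false_iff_ne, ne_eq]
        exact fun hs => hac (pvSing_inj hs)
      have hca : ¬ ch = a := fun h => hac h.symm
      simp only [PySem.Dict.contains, List.map_cons, List.any_cons] at *
      simp [hbe, ih, hca]

theorem pvInsert_mapped (ks : List Char) (f : Char → Int) (ch : Char) (v : Int) :
    PySem.Dict.insert ⟨ks.map (fun a => (String.singleton a, f a))⟩ (String.singleton ch) v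
      = if ch ∈ ks then ⟨ks.map (fun a => (String.singleton a, if a = ch then v else f a))⟩
        else ⟨ks.map (fun a => (String.singleton a, f a)) ++ [(String.singleton ch, v)]⟩ := by
  unfold PySem.Dict.insert
  rw [pvContains_mapped]
  by_cases h : ch ∈ ks
  · simp only [h, decide_true, if_true]
    congr 1
    rw [List.map_map]
    refine List.map_congr_left (fun a _ => ?_)
    by_cases hac : a = ch
    · subst hac; simp
    · have hbe : (String.singleton a == String.singleton ch) = false := by
        simp only [beq_eq_false_iff_ne, ne_eq]
        exact fun hs => hac (pvSing_inj hs)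
      simp [Function.comp, hbe, hac]
  · simp [h]

theorem pvOfList_append_singleton {α : Type} [BEq α] [LawfulBEq α] (xs : List α) (ch : α) :
    PySem.Set.ofList (xs ++ [ch])
      = if ch ∈ xs then PySem.Set.ofList xs else PySem.Set.ofList xs ++ [ch] := by
  have : PySem.Set.ofList (xs ++ [ch]) = PySem.Set.add (PySem.Set.ofList xs) ch := by
    simp [PySem.Set.ofList, List.foldl_append]
  rw [this, PySem.Set.add]
  by_cases h : ch ∈ xs
  · have : PySem.Set.contains (PySem.Set.ofList xs) ch = true := by
      simpa [PySem.Set.contains] using (PySem.Set.mem_ofList xs ch).mpr h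
    simp [this, h]
  · have : PySem.Set.contains (PySem.Set.ofList xs) ch = false := by
      simp only [PySem.Set.contains, List.contains_eq_mem, decide_eq_false_iff_not]
      exact fun hm => h ((PySem.Set.mem_ofList xs ch).mp hm)
    simp [this, h]

-- A's incremental dict equals the canonical counting dict of the consumed pref
theorem pvCnt_eq (xs : List Char) : pvCnt xs = ⟨pvRow xs⟩ := by
  induction xs using List.reverseRecOn with
  | nil => simp [pvCnt, pvRow, PySem.Set.ofList, PySem.Set.empty, PySem.Dict.empty]
  | append_singleton xs ch ih =>
    rw [pvCnt, List.foldl_append, ← pvCnt]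
    simp only [List.foldl_cons, List.foldl_nil, ih, pvRow]
    rw [pvGetD_mapped, pvInsert_mapped]
    simp only [PySem.Set.mem_ofList]
    rw [pvOfList_append_singleton]
    by_cases h : ch ∈ xs
    · simp only [h, if_true]
      congr 1
      refine List.map_congr_left (fun a _ => ?_)
      by_cases hac : a = ch
      · subst hac; simp [List.count_append]
      · have hca : ¬ ch = a := fun h' => hac h'.symm
        simp [hac, hca, List.count_append]
    · simp only [h, if_false, List.map_append, List.map_cons, List.map_nil]
      have h1 : (PySem.Set.ofList xs).map (fun a => (String.singleton a, (xs.count a : Int)))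
          = (PySem.Set.ofList xs).map
              (fun a => (String.singleton a, ((xs ++ [ch]).count a : Int))) := by
        refine List.map_congr_left (fun a ha => ?_)
        have hac : a ≠ ch := fun he => h (he ▸ ((PySem.Set.mem_ofList xs a).mp ha))
        have hca : ¬ ch = a := fun h' => hac h'.symm
        simp [hac, hca, List.count_append]
      have h2 : ((0 : Int) + 1) = (((xs ++ [ch]).count ch : Nat) : Int) := by
        simp [List.count_append, List.count_eq_zero_of_not_mem h]
      rw [h1, h2]

-- B's per-pref fold (any value function constant along the fold) is the mapped dict
theorem pvFoldIns (v : Char → Int) (p : List Char) :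
    p.foldl (fun d ch => PySem.Dict.insert d (String.singleton ch) (v ch)) PySem.Dict.empty
      = ⟨(PySem.Set.ofList p).map (fun a => (String.singleton a, v a))⟩ := by
  induction p using List.reverseRecOn with
  | nil => simp [PySem.Set.ofList, PySem.Set.empty, PySem.Dict.empty]
  | append_singleton p ch ih =>
    rw [List.foldl_append, ih]
    simp only [List.foldl_cons, List.foldl_nil]
    rw [pvInsert_mapped, pvOfList_append_singleton]
    simp only [PySem.Set.mem_ofList]
    by_cases h : ch ∈ p
    · simp only [h, if_true]
      congr 1
      refine List.map_congr_left (fun a _ => ?_)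
      by_cases hac : a = ch
      · subst hac; simp
      · simp [hac]
    · simp [h]

-- the invariant of A's loop, with the i % c test kept verbatim
theorem pvLoopA (c : Int) :
    ∀ (xs p : List Char) (acc : List (List (String × Int))),
      ((PySem.List.enumerate xs ((p.length : Int) + 1)).foldl (pvStepA c) (pvCnt p, acc)).2
        = acc ++ (List.range xs.length).filterMap (fun t =>
            if PySem.Int.mod (((p.length + t + 1 : Nat) : Int)) c = 0
            then some (pvRow (p ++ xs.take (t + 1))) else none) := by
  intro xs
  induction xs with
  | nil => intro p acc; simp [PySem.List.enumerate]
  | cons ch xs ih =>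
    intro p acc
    rw [PySem.List.enumerate_cons]
    have hcnt : PySem.Dict.insert (pvCnt p) (String.singleton ch)
        (PySem.Dict.getD (pvCnt p) (String.singleton ch) 0 + 1) = pvCnt (p ++ [ch]) := by
      simp [pvCnt, List.foldl_append]
    have hstart : ((p.length : Int) + 1) + 1 = (((p ++ [ch]).length : Int) + 1) := by
      push_cast [List.length_append, List.length_cons, List.length_nil]; ring
    have htail : (List.range xs.length).filterMap ((fun t =>
          if PySem.Int.mod (((p.length + t + 1 : Nat) : Int)) c = 0
          then some (pvRow (p ++ (ch :: xs).take (t + 1))) else none) ∘ Nat.succ)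
        = (List.range xs.length).filterMap (fun t =>
            if PySem.Int.mod ((((p ++ [ch]).length + t + 1 : Nat) : Int)) c = 0
            then some (pvRow ((p ++ [ch]) ++ xs.take (t + 1))) else none) := by
      refine List.filterMap_congr (fun t _ => ?_)
      have h1 : p.length + (t + 1) + 1 = (p ++ [ch]).length + t + 1 := by simp; omega
      have h2 : p ++ (ch :: xs).take (t + 1 + 1) = (p ++ [ch]) ++ xs.take (t + 1) := by
        simp [List.take_succ_cons]
      simp only [Function.comp, Nat.succ_eq_add_one, h1, h2]
    rw [List.foldl_cons]
    by_cases hm0 : PySem.Int.mod ((p.length : Int) + 1) c = 0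
    · have hstep : pvStepA c (pvCnt p, acc) ((p.length : Int) + 1, ch)
          = (pvCnt (p ++ [ch]), acc ++ [(pvCnt (p ++ [ch])).items]) := by
        simp only [pvStepA, hcnt]; rw [if_pos hm0]
      rw [hstep, hstart, ih]
      rw [List.length_cons, List.range_succ_eq_map, List.filterMap_cons, List.filterMap_map,
        htail]
      simp [hm0, pvCnt_eq, List.take_succ_cons]
    · have hstep : pvStepA c (pvCnt p, acc) ((p.length : Int) + 1, ch)
          = (pvCnt (p ++ [ch]), acc) := by
        simp only [pvStepA, hcnt]; rw [if_neg hm0]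
      rw [hstep, hstart, ih]
      rw [List.length_cons, List.range_succ_eq_map, List.filterMap_cons, List.filterMap_map,
        htail]
      simp [hm0]

-- 'if cond: out.append(f i)' folds are filterMap appends
theorem pvFoldAppendIf {α β : Type} (q : α → Prop) [DecidablePred q] (f : α → β) :
    ∀ (l : List α) (acc : List β),
      l.foldl (fun out i => if q i then out ++ [f i] else out) acc
        = acc ++ l.filterMap (fun i => if q i then some (f i) else none) := by
  intro l
  induction l with
  | nil => intro acc; simp
  | cons a l ih =>
    intro acc
    rw [List.foldl_cons, List.filterMap_cons]
    by_cases h : q a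
    · rw [if_pos h, if_pos h, ih]; simp
    · rw [if_neg h, if_neg h, ih]

-- B in the same closed form as A's loop invariant
theorem pvAltEq (bwt : String) (c : Int) :
    buildCheckpointCountArraysBWT_alt bwt c
      = [[]] ++ (List.range bwt.toList.length).filterMap (fun t =>
          if PySem.Int.mod (((t + 1 : Nat) : Int)) c = 0
          then some (pvRow (bwt.toList.take (t + 1))) else none) := by
  simp only [buildCheckpointCountArraysBWT_alt]
  have hlen : PySem.Str.len bwt = (bwt.toList.length : Int) := by simp [PySem.Str.len_eq]
  rw [hlen, pvFoldAppendIf (fun i => PySem.Int.mod i c = 0), PySem.List.pyRange_one]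
  have hto : ((bwt.toList.length : Int) + 1 - 1).toNat = bwt.toList.length := by
    simp
  rw [hto, List.filterMap_map]
  congr 1
  refine List.filterMap_congr (fun t _ => ?_)
  have h1 : (1 : Int) + (t : Int) = (((t + 1 : Nat) : Int)) := by push_cast; ring
  simp only [Function.comp, h1]
  by_cases h : PySem.Int.mod (((t + 1 : Nat) : Int)) c = 0
  · rw [if_pos h, if_pos h]
    have hb : (PySem.Str.slice bwt none (some (((t + 1 : Nat) : Int)))).toList
        = PySem.List.slice bwt.toList none (some (((t + 1 : Nat) : Int))) := by
      simp [PySem.Str.slice]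
    rw [hb, PySem.List.slice_to_natCast, pvFoldIns]
    rfl
  · rw [if_neg h, if_neg h]

-- ===== VERDICT (by name: the statement is the Claim_ definition above) =====
theorem buildCheckpointCountArraysBWT_spec : Claim_equal_buildCheckpointCountArraysBWT := by
  intro bwt c _hdom _hpre
  unfold Spec_buildCheckpointCountArraysBWT
  have hA : buildCheckpointCountArraysBWT bwt c
      = [[]] ++ (List.range bwt.toList.length).filterMap (fun t =>
          if PySem.Int.mod (((t + 1 : Nat) : Int)) c = 0
          then some (pvRow (bwt.toList.take (t + 1))) else none) := by
    unfold buildCheckpointCountArraysBWT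
    have h0 : (1 : Int) = ((([] : List Char).length : Int) + 1) := by simp
    have hcnt0 : (PySem.Dict.empty : PySem.Dict String Int) = pvCnt [] := rfl
    rw [h0, hcnt0, pvLoopA c bwt.toList [] [[]]]
    simp
  rw [hA, pvAltEq bwt c]
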